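-- pv_equiv track=rewrite | github.com/LucidLabPlatform/lucid-central-command | services/auth/app.py | _agent_allowed
-- ===== SOURCE A (Python) =====
-- def _match(pattern: str, topic: str) -> bool:
--     """MQTT wildcard match: + = single level, # = trailing multi-level."""
--     p_parts = pattern.split("/")
--     t_parts = topic.split("/")
--
--     for i, pp in enumerate(p_parts):
--         if pp == "#":
--             return True
--         if i >= len(t_parts):
--             return False
--         if pp != "+" and pp != t_parts[i]:
--             return False
--
--     return len(p_parts) == len(t_parts)
--
-- def _agent_allowed(agent_id: str, topic: str, action: str) -> bool:
--     ns = f"lucid/agents/{agent_id}"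
--     comp = f"{ns}/components/+"
--
--     if action == "subscribe":
--         return _match(f"{ns}/cmd/#", topic)
--
--     if action == "publish":
--         allowed_patterns = [
--             f"{ns}/status",
--             f"{ns}/state",
--             f"{ns}/metadata",
--             f"{ns}/cfg",
--             f"{ns}/cfg/logging",
--             f"{ns}/cfg/telemetry",
--             f"{ns}/logs",
--             f"{ns}/telemetry/#",
--             f"{ns}/evt/#",
--             # component sub-topics
--             f"{comp}/status",
--             f"{comp}/state",
--             f"{comp}/metadata",
--             f"{comp}/cfg",
--             f"{comp}/cfg/logging",
--             f"{comp}/cfg/telemetry",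
--             f"{comp}/logs",
--             f"{comp}/telemetry/#",
--             f"{comp}/evt/#",
--         ]
--         return any(_match(p, topic) for p in allowed_patterns)
--
--     return False
-- ===== SOURCE B (Python) =====
-- def _tail_match(p, t):
--     """Match segment-list pattern p against segment-list topic t recursively."""
--     if not p:
--         return not t
--     if p[0] == "#":
--         return True
--     if not t:
--         return False
--     if p[0] != "+" and p[0] != t[0]:
--         return False
--     return _tail_match(p[1:], t[1:])
--
--
-- def _agent_allowed(agent_id: str, topic: str, action: str) -> bool:
--     t = topic.split("/")
--     base = ["lucid", "agents", *agent_id.split("/")]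
--     if action == "subscribe":
--         return _tail_match(base + ["cmd", "#"], t)
--     if action != "publish":
--         return False
--     suffixes = [["status"], ["state"], ["metadata"], ["cfg"],
--                 ["cfg", "logging"], ["cfg", "telemetry"], ["logs"],
--                 ["telemetry", "#"], ["evt", "#"]]
--     comp = base + ["components", "+"]
--     return (any(_tail_match(base + s, t) for s in suffixes)
--             or any(_tail_match(comp + s, t) for s in suffixes))
-- ===== Notes on version B (the rewrite author's own statement) =====
-- stated objective: alternative
-- what changed: B splits the topic once and matches segment-list patterns (base prefix + literal suffix lists) with a recursive lockstep matcher, instead of A's formatting 18 pattern strings and re-splitting each one inside an index-based loop over the pattern segments.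
import Mathlib
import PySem

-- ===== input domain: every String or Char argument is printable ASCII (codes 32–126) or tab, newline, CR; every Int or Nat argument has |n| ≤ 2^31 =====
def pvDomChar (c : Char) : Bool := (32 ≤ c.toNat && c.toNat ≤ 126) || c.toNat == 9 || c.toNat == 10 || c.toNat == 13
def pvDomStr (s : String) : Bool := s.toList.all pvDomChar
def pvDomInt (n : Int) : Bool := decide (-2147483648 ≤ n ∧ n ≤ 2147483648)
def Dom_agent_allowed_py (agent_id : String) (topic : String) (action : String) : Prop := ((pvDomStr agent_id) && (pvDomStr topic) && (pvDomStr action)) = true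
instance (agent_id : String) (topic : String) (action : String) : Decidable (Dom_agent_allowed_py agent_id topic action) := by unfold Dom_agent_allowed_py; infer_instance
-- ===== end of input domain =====

-- B matches segment-list patterns with a recursive lockstep matcher over one topic split,
-- instead of A's 18 formatted pattern strings each re-split inside an index-based loop (alternative; same value everywhere).

-- ===== PORT A =====
-- the for-loop of _match: index i over p_parts, early returns as some, loop exhaustion as none
def matchGoA (tps : List (List Char)) : List (List Char) → Nat → Option Bool
  | [], _ => none
  | pp :: rest, i =>
    if pp = ['#'] then some true
    else if tps.length ≤ i then some false
    else if pp ≠ ['+'] && pp ≠ ((PySem.List.pyGet? tps (i : Int)).getD []) then some false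
    else matchGoA tps rest (i + 1)

def matchA (pattern : List Char) (topic : List Char) : Bool :=
  let p_parts := PySem.Chars.splitOn pattern ['/']
  let t_parts := PySem.Chars.splitOn topic ['/']
  match matchGoA t_parts p_parts 0 with
  | some b => b
  | none => p_parts.length == t_parts.length

def agent_allowed_py (agent_id : String) (topic : String) (action : String) : Bool :=
  let ns : List Char := "lucid/agents/".toList ++ agent_id.toList
  let comp : List Char := ns ++ "/components/+".toList
  if action = "subscribe" then matchA (ns ++ "/cmd/#".toList) topic.toList
  else if action = "publish" then
    let allowed_patterns : List (List Char) :=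
      [ ns ++ "/status".toList, ns ++ "/state".toList, ns ++ "/metadata".toList,
        ns ++ "/cfg".toList, ns ++ "/cfg/logging".toList, ns ++ "/cfg/telemetry".toList,
        ns ++ "/logs".toList, ns ++ "/telemetry/#".toList, ns ++ "/evt/#".toList,
        comp ++ "/status".toList, comp ++ "/state".toList, comp ++ "/metadata".toList,
        comp ++ "/cfg".toList, comp ++ "/cfg/logging".toList, comp ++ "/cfg/telemetry".toList,
        comp ++ "/logs".toList, comp ++ "/telemetry/#".toList, comp ++ "/evt/#".toList ]
    allowed_patterns.any (fun p => matchA p topic.toList)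
  else false

-- ===== PORT B =====
def tailMatch : List (List Char) → List (List Char) → Bool
  | [], t => t.isEmpty
  | pp :: p, t =>
    if pp = ['#'] then true
    else match t with
      | [] => false
      | tp :: t' => if pp ≠ ['+'] && pp ≠ tp then false else tailMatch p t'

def pvSuffixes : List (List (List Char)) :=
  [ ["status".toList], ["state".toList], ["metadata".toList], ["cfg".toList],
    ["cfg".toList, "logging".toList], ["cfg".toList, "telemetry".toList], ["logs".toList],
    ["telemetry".toList, ['#']], ["evt".toList, ['#']] ]

def agent_allowed_py_alt (agent_id : String) (topic : String) (action : String) : Bool :=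
  let t := PySem.Chars.splitOn topic.toList ['/']
  let base := ["lucid".toList, "agents".toList] ++ PySem.Chars.splitOn agent_id.toList ['/']
  if action = "subscribe" then tailMatch (base ++ ["cmd".toList, ['#']]) t
  else if action ≠ "publish" then false
  else
    let comp := base ++ ["components".toList, ['+']]
    (pvSuffixes.any fun s => tailMatch (base ++ s) t) ||
    (pvSuffixes.any fun s => tailMatch (comp ++ s) t)

-- ===== PRECONDITION & SPEC =====
def Spec_agent_allowed_py (agent_id : String) (topic : String) (action : String) (out : Bool) : Prop := out = agent_allowed_py_alt agent_id topic action
instance (agent_id : String) (topic : String) (action : String) (out : Bool) : Decidable (Spec_agent_allowed_py agent_id topic action out) := by unfold Spec_agent_allowed_py; infer_instance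

-- ===== CLAIM (what is proved, stated in full; the proofs are below) =====
def Claim_equal_agent_allowed_py : Prop := ∀ (agent_id : String) (topic : String) (action : String), Dom_agent_allowed_py agent_id topic action → Spec_agent_allowed_py agent_id topic action (agent_allowed_py agent_id topic action)

-- ===== LEMMAS AND PROOFS =====

-- proof-only reference split on '/'
def splitSlash : List Char → List (List Char)
  | [] => [[]]
  | c :: rest =>
    if c = '/' then [] :: splitSlash rest
    else match splitSlash rest with
      | [] => [[c]]
      | h :: t => (c :: h) :: t

theorem splitSlash_ne_nil (l : List Char) : splitSlash l ≠ [] := by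
  cases l with
  | nil => simp [splitSlash]
  | cons c rest =>
    simp only [splitSlash]
    split_ifs
    · simp
    · cases splitSlash rest <;> simp

theorem splitOn_go_eq (fuel : Nat) (l cur : List Char) (acc : List (List Char))
    (h : l.length < fuel) :
    PySem.Chars.splitOn.go ['/'] fuel l cur acc
      = acc.reverse ++ (splitSlash l).modifyHead (cur.reverse ++ ·) := by
  induction fuel generalizing l cur acc with
  | zero => omega
  | succ fuel ih =>
    cases l with
    | nil => simp [PySem.Chars.splitOn.go, splitSlash]
    | cons c rest =>
      by_cases hc : c = '/'
      · subst hc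
        have hpre : (['/'] : List Char).isPrefixOf ('/' :: rest) = true := by
          simp [List.isPrefixOf]
        rw [PySem.Chars.splitOn.go]
        simp only [hpre, if_pos]
        have hd : List.drop (['/'] : List Char).length ('/' :: rest) = rest := rfl
        rw [hd, ih rest [] (cur.reverse :: acc) (by simpa using Nat.lt_of_succ_lt_succ h)]
        simp only [splitSlash, List.modifyHead_cons, List.reverse_cons, List.append_assoc,
          List.singleton_append, List.nil_append]
        cases splitSlash rest <;> simp
      · have hpre : (['/'] : List Char).isPrefixOf (c :: rest) = false := by
          simp [List.isPrefixOf]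
          exact fun hcc => hc hcc.symm
        rw [PySem.Chars.splitOn.go]
        simp only [hpre]
        rw [if_neg (by simp)]
        rw [ih rest (c :: cur) acc (by simpa using Nat.lt_of_succ_lt_succ h)]
        simp only [splitSlash, if_neg hc]
        rcases hsp : splitSlash rest with _ | ⟨h1, t1⟩
        · exact absurd hsp (splitSlash_ne_nil rest)
        · simp

theorem splitOn_eq_splitSlash (l : List Char) :
    PySem.Chars.splitOn l ['/'] = splitSlash l := by
  unfold PySem.Chars.splitOn
  rw [splitOn_go_eq _ _ _ _ (by omega)]
  cases splitSlash l <;> simp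

theorem splitSlash_append (a b : List Char) :
    splitSlash (a ++ '/' :: b) = splitSlash a ++ splitSlash b := by
  induction a with
  | nil => simp [splitSlash]
  | cons c a ih =>
    by_cases hc : c = '/'
    · subst hc; simp [splitSlash, ih]
    · simp only [List.cons_append, splitSlash, if_neg hc, ih]
      rcases hsp : splitSlash a with _ | ⟨h1, t1⟩
      · exact absurd hsp (splitSlash_ne_nil a)
      · simp

-- the loop of A's _match agrees with B's lockstep matcher
theorem matchGoA_eq (t : List (List Char)) (p : List (List Char)) (i : Nat) (hi : i ≤ t.length) :
    (match matchGoA t p i with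
     | some b => b
     | none => p.length + i == t.length) = tailMatch p (t.drop i) := by
  induction p generalizing i with
  | nil =>
    simp only [matchGoA, tailMatch]
    rw [Bool.eq_iff_iff]
    simp [List.drop_eq_nil_iff, List.isEmpty_iff]
    omega
  | cons pp rest ih =>
    rw [matchGoA]
    by_cases hsharp : pp = ['#']
    · simp [hsharp, tailMatch]
    · rw [if_neg hsharp]
      by_cases hlen : t.length ≤ i
      · rw [if_pos hlen]
        have hdrop : t.drop i = [] := by rw [List.drop_eq_nil_iff]; omega
        simp [hdrop, tailMatch, hsharp]
      · push_neg at hlen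
        rw [if_neg (by omega)]
        have hdrop : t.drop i = t[i] :: t.drop (i + 1) := by
          rw [List.drop_eq_getElem_cons hlen]
        have hget : (PySem.List.pyGet? t (i : Int)).getD [] = t[i] := by
          simp [PySem.List.pyGet?, PySem.List.pyIdx?, hlen]
        rw [hdrop]
        simp only [tailMatch, if_neg hsharp, hget]
        split_ifs with hcond
        · rfl
        · have harith : (pp :: rest).length + i = rest.length + (i + 1) := by
            simp [List.length_cons]; omega
          rw [harith]
          exact ih (i + 1) (by omega)

theorem matchA_eq (pattern topic : List Char) :
    matchA pattern topic = tailMatch (splitSlash pattern) (splitSlash topic) := by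
  unfold matchA
  rw [splitOn_eq_splitSlash, splitOn_eq_splitSlash]
  simpa using matchGoA_eq (splitSlash topic) (splitSlash pattern) 0 (Nat.zero_le _)

-- split of "lucid/agents/<aid>/<suffix>"
theorem splitSlash_pat (aid suf : List Char) :
    splitSlash ("lucid/agents/".toList ++ aid ++ ('/' :: suf))
      = (["lucid".toList, "agents".toList] ++ splitSlash aid) ++ splitSlash suf := by
  have h1 : "lucid/agents/".toList ++ aid ++ ('/' :: suf)
      = "lucid".toList ++ '/' :: ("agents".toList ++ '/' :: (aid ++ '/' :: suf)) := by
    simp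
  rw [h1, splitSlash_append, splitSlash_append, splitSlash_append]
  simp [splitSlash]

theorem pat_match (aid tp suf : List Char) :
    matchA ("lucid/agents/".toList ++ aid ++ ('/' :: suf)) tp
      = tailMatch ((["lucid".toList, "agents".toList] ++ splitSlash aid) ++ splitSlash suf)
          (splitSlash tp) := by
  rw [matchA_eq, splitSlash_pat]

theorem pat_match_comp (aid tp suf : List Char) :
    matchA (("lucid/agents/".toList ++ aid ++ "/components/+".toList) ++ ('/' :: suf)) tp
      = tailMatch (((["lucid".toList, "agents".toList] ++ splitSlash aid)
            ++ ["components".toList, ['+']]) ++ splitSlash suf) (splitSlash tp) := by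
  have h1 : ("lucid/agents/".toList ++ aid ++ "/components/+".toList) ++ ('/' :: suf)
      = "lucid/agents/".toList ++ aid ++ ('/' :: ("components/+".toList ++ '/' :: suf)) := by
    simp
  rw [h1, matchA_eq, splitSlash_pat, splitSlash_append]
  have h2 : splitSlash "components/+".toList = ["components".toList, ['+']] := by decide
  rw [h2]
  simp [List.append_assoc]

-- ===== VERDICT (by name: the statement is the Claim_ definition above) =====
theorem agent_allowed_py_spec : Claim_equal_agent_allowed_py := by
  intro agent_id topic action _
  unfold Spec_agent_allowed_py
  simp only [agent_allowed_py, agent_allowed_py_alt]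
  by_cases hs : action = "subscribe"
  · simp only [hs, reduceIte]
    have e1 : ("/cmd/#" : String).toList = '/' :: "cmd/#".toList := rfl
    rw [e1, pat_match, splitOn_eq_splitSlash, splitOn_eq_splitSlash]
    have h2 : splitSlash "cmd/#".toList = ["cmd".toList, ['#']] := by decide
    rw [h2]
  · by_cases hp : action = "publish"
    · rw [if_neg hs, if_neg hs, if_pos hp, if_neg (by simp [hp])]
      simp only [List.any_cons, List.any_nil, pvSuffixes, splitOn_eq_splitSlash]
      have e1 : ("/status" : String).toList = '/' :: "status".toList := rfl
      have e2 : ("/state" : String).toList = '/' :: "state".toList := rfl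
      have e3 : ("/metadata" : String).toList = '/' :: "metadata".toList := rfl
      have e4 : ("/cfg" : String).toList = '/' :: "cfg".toList := rfl
      have e5 : ("/cfg/logging" : String).toList = '/' :: "cfg/logging".toList := rfl
      have e6 : ("/cfg/telemetry" : String).toList = '/' :: "cfg/telemetry".toList := rfl
      have e7 : ("/logs" : String).toList = '/' :: "logs".toList := rfl
      have e8 : ("/telemetry/#" : String).toList = '/' :: "telemetry/#".toList := rfl
      have e9 : ("/evt/#" : String).toList = '/' :: "evt/#".toList := rfl
      rw [e1, e2, e3, e4, e5, e6, e7, e8, e9]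
      simp only [pat_match, pat_match_comp]
      have s1 : splitSlash "status".toList = ["status".toList] := by decide
      have s2 : splitSlash "state".toList = ["state".toList] := by decide
      have s3 : splitSlash "metadata".toList = ["metadata".toList] := by decide
      have s4 : splitSlash "cfg".toList = ["cfg".toList] := by decide
      have s5 : splitSlash "cfg/logging".toList = ["cfg".toList, "logging".toList] := by decide
      have s6 : splitSlash "cfg/telemetry".toList = ["cfg".toList, "telemetry".toList] := by decide
      have s7 : splitSlash "logs".toList = ["logs".toList] := by decide
      have s8 : splitSlash "telemetry/#".toList = ["telemetry".toList, ['#']] := by decide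
      have s9 : splitSlash "evt/#".toList = ["evt".toList, ['#']] := by decide
      rw [s1, s2, s3, s4, s5, s6, s7, s8, s9]
      simp only [Bool.or_assoc, Bool.or_false, List.append_assoc]
    · simp [hs, hp]
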